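-- pv_equiv track=rewrite | github.com/CUGer3888/Russian_sand_blocks | 俄罗斯沙块_pyhton版/v1.1.py | r_and_c_sum
-- ===== SOURCE A (Python) =====
-- WIDTH = 500
--
-- def r_and_c_sum(map,start_row,x):
--     lis = []
--     for i in range(WIDTH):
--         sum = 0
--         for j in range(start_row,start_row+x):
--             sum += map[i][j]
--         lis.append(sum)
--     return lis
-- ===== SOURCE B (Python) =====
-- WIDTH = 500
--
-- def r_and_c_sum(map, start_row, x):
--     lis = [0] * WIDTH
--     for j in range(start_row, start_row + x):
--         lis = [s + row[j] for s, row in zip(lis, map)]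
--     return lis
-- ===== Notes on version B (the rewrite author's own statement) =====
-- stated objective: alternative
-- what changed: Instead of finishing each of the 500 column sums with a nested per-column loop, B keeps a 500-vector of running sums and sweeps the window row-by-row, rebuilding the vector with zip(lis, map) so no explicit column index remains.
import Mathlib
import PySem

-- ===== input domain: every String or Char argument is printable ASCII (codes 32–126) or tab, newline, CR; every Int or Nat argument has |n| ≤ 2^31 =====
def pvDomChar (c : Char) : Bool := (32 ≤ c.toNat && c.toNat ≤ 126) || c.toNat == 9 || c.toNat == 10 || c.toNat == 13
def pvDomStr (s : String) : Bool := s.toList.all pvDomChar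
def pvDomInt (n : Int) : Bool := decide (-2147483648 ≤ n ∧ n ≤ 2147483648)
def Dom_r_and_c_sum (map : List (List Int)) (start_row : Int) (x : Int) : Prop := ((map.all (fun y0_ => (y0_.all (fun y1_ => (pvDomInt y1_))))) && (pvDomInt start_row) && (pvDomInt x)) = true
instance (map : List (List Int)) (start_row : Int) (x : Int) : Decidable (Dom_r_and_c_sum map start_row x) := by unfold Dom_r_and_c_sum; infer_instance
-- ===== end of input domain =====

-- B replaces A's per-column nested loop with a running 500-vector of column sums swept row-by-row across the window (alternative decomposition, same cost).

set_option maxRecDepth 4000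


-- ===== PORT A =====
-- A: for each column i in range(500), sum map[i][j] over the window, append to lis.
def r_and_c_sum (map : List (List Int)) (start_row : Int) (x : Int) : List Int :=
  (PySem.List.pyRange 0 500 1).foldl
    (fun lis i =>
      lis ++ [(PySem.List.pyRange start_row (start_row + x) 1).foldl
        (fun sum j => sum + PySem.List.pyGetD (PySem.List.pyGetD map i []) j 0) 0])
    []

-- ===== PORT B =====
-- B: lis = [0]*500; for each window row j, lis = [s + row[j] for s, row in zip(lis, map)].
def r_and_c_sum_alt (map : List (List Int)) (start_row : Int) (x : Int) : List Int :=
  (PySem.List.pyRange start_row (start_row + x) 1).foldl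
    (fun lis j => (lis.zip map).map (fun p => p.1 + PySem.List.pyGetD p.2 j 0))
    (List.replicate 500 0)

-- ===== PRECONDITION & SPEC =====
-- Pre_: exactly the inputs on which A returns: either the window is empty (x ≤ 0, no indexing
-- happens at all), or map has at least 500 rows and every window index j (including negative,
-- wrap-around ones) is a valid Python index into each of the first 500 rows.
def Pre_r_and_c_sum (map : List (List Int)) (start_row : Int) (x : Int) : Prop :=
  x ≤ 0 ∨ (500 ≤ map.length ∧
    ∀ row ∈ map.take 500, -(row.length : Int) ≤ start_row ∧ start_row + x ≤ (row.length : Int))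
instance (map : List (List Int)) (start_row : Int) (x : Int) : Decidable (Pre_r_and_c_sum map start_row x) := by unfold Pre_r_and_c_sum; infer_instance
def pvWitness_r_and_c_sum : List (List Int) × Int × Int := ([], 0, 0)

def Spec_r_and_c_sum (map : List (List Int)) (start_row : Int) (x : Int) (out : List Int) : Prop := out = r_and_c_sum_alt map start_row x
instance (map : List (List Int)) (start_row : Int) (x : Int) (out : List Int) : Decidable (Spec_r_and_c_sum map start_row x out) := by unfold Spec_r_and_c_sum; infer_instance

-- ===== CLAIM (what is proved, stated in full; the proofs are below) =====
def Claim_equal_r_and_c_sum : Prop := ∀ (map : List (List Int)) (start_row : Int) (x : Int), Dom_r_and_c_sum map start_row x → Pre_r_and_c_sum map start_row x → Spec_r_and_c_sum map start_row x (r_and_c_sum map start_row x)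

-- ===== LEMMAS AND PROOFS =====

-- shift an additive foldl's initial accumulator out front
theorem foldl_add_shift (h : Int → Int) (js : List Int) (a : Int) :
    js.foldl (fun acc j => acc + h j) a = a + js.foldl (fun acc j => acc + h j) 0 := by
  induction js generalizing a with
  | nil => simp
  | cons j js ih =>
    simp only [List.foldl_cons]
    rw [ih (a + h j), ih (0 + h j)]
    ring

-- B's loop invariant: folding the window rows over any start vector adds, pointwise,
-- each paired row's window sum.
theorem alt_loop_eq (map : List (List Int)) (js : List Int) (lis : List Int)
    (hlen : lis.length ≤ map.length) :
    js.foldl (fun lis j => (lis.zip map).map (fun p => p.1 + PySem.List.pyGetD p.2 j 0)) lis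
      = (lis.zip map).map
          (fun p => p.1 + js.foldl (fun acc j => acc + PySem.List.pyGetD p.2 j 0) 0) := by
  induction js generalizing lis with
  | nil =>
    simp only [List.foldl_nil, add_zero]
    rw [show (fun p : Int × List Int => p.1) = Prod.fst from rfl, List.map_fst_zip hlen]
  | cons j js ih =>
    simp only [List.foldl_cons]
    rw [ih _ (by simp)]
    apply List.ext_getElem
    · simp
    · intro k h1 h2
      simp only [List.length_map, List.length_zip, lt_min_iff] at h1
      obtain ⟨hk, hkm⟩ := h1
      simp only [List.getElem_map, List.getElem_zip]
      rw [foldl_add_shift]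
      simp only [zero_add]
      rw [foldl_add_shift (fun j1 => PySem.List.pyGetD map[k] j1 0) js (PySem.List.pyGetD map[k] j 0)]
      ring

theorem r_and_c_sum_spec : Claim_equal_r_and_c_sum := by
  intro map start_row x _hdom hpre
  unfold Spec_r_and_c_sum r_and_c_sum r_and_c_sum_alt
  rw [PySem.List.foldl_append_singleton_eq_map]
  rcases hpre with hx | ⟨hlen, _hwin⟩
  · -- empty window: both sides are 500 zeros
    rw [PySem.List.pyRange_one_eq_nil (by omega : start_row + x ≤ start_row)]
    simp [List.map_const']
  · -- nonempty window possible: pointwise equality of the 500 entries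
    rw [alt_loop_eq map _ _ (by simpa using hlen)]
    apply List.ext_getElem
    · simp [PySem.List.length_pyRange_one, hlen]
    · intro k h1 h2
      have hk : k < 500 := by simpa [PySem.List.length_pyRange_one] using h1
      have hkm : k < map.length := lt_of_lt_of_le hk hlen
      simp only [List.nil_append, List.getElem_map, List.getElem_zip,
        List.getElem_replicate, PySem.List.getElem_pyRange_one]
      have : PySem.List.pyGetD map (0 + (k : Int)) [] = map[k] := by
        rw [zero_add, PySem.List.pyGetD_natCast, List.getD_eq_getElem _ _ hkm]
      rw [this, zero_add]
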